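-- pv_equiv track=rewrite | github.com/lily11265/discod_bot | utils/synergy.py | apply_synergy_bonus
-- ===== SOURCE A (Python) =====
-- def apply_synergy_bonus(base_target: int, synergies: list, context: str) -> int:
--     """시너지 보너스를 적용한 목표값 반환"""
--     modified_target = base_target
--
--     for synergy in synergies:
--         if synergy['effect'] == 'all_bonus_20':
--             # 완벽한 균형: 성공률 +20% (목표값 -20)
--             modified_target -= 20
--
--         elif synergy['effect'] == 'danger_auto_success' and context == 'danger_detection':
--             # 극단 관찰자: 위험 감지 자동 성공
--             modified_target = 1  # 무조건 성공
--
--     return modified_target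
-- ===== SOURCE B (Python) =====
-- def apply_synergy_bonus(base_target: int, synergies: list, context: str) -> int:
--     """Reverse scan: the last matching danger override fixes the base at 1 and
--     erases all earlier bonuses, so only -20 bonuses after it matter."""
--     delta = 0
--     for synergy in reversed(synergies):
--         effect = synergy['effect']
--         if effect == 'all_bonus_20':
--             delta -= 20
--         elif effect == 'danger_auto_success' and context == 'danger_detection':
--             return 1 + delta
--     return base_target + delta
-- ===== Notes on version B (the rewrite author's own statement) =====
-- stated objective: alternative
-- what changed: Replaces the forward fold that mutates the target with a reverse scan keeping a bonus accumulator, returning early at the last effective danger override (which erases earlier bonuses); same O(n) cost.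
-- outside the precondition, e.g. on apply_synergy_bonus(50, [{}], 'x'): A raises KeyError, B raises KeyError
import Mathlib
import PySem

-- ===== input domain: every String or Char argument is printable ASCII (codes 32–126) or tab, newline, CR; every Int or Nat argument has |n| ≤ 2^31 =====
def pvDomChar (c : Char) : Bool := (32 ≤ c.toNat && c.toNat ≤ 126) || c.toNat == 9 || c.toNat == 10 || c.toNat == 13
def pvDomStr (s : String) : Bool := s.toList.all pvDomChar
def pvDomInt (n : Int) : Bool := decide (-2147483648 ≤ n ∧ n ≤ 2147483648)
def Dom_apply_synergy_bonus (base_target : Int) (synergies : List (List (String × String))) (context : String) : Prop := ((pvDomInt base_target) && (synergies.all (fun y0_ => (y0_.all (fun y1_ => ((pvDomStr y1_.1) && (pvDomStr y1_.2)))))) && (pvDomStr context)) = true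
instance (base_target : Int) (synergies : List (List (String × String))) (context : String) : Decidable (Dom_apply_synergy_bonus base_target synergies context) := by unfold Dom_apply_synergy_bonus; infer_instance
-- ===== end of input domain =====

-- B replaces A's forward fold with a reverse scan carrying a bonus accumulator
-- and an early return at the last effective danger override; same cost, agree
-- wherever every synergy dict has an 'effect' key (Python raises KeyError else).

-- synergy['effect']: first match in the association list; Pre_ guarantees the
-- key is present (Python raises KeyError otherwise); the "" default is never
-- reached inside Pre_.
def pvEffect (syn : List (String × String)) : String :=
  ((syn.find? (fun kv => kv.1 == "effect")).map (·.2)).getD ""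

-- ===== PORT A =====
def apply_synergy_bonus (base_target : Int) (synergies : List (List (String × String))) (context : String) : Int :=
  synergies.foldl
    (fun modified_target synergy =>
      if pvEffect synergy == "all_bonus_20" then
        modified_target - 20
      else if pvEffect synergy == "danger_auto_success" && context == "danger_detection" then
        1
      else
        modified_target)
    base_target

-- ===== PORT B =====
def pvAltLoop (base_target : Int) (context : String) : List (List (String × String)) → Int → Int
  | [], delta => base_target + delta
  | synergy :: rest, delta =>
    let effect := pvEffect synergy
    if effect == "all_bonus_20" then
      pvAltLoop base_target context rest (delta - 20)
    else if effect == "danger_auto_success" && context == "danger_detection" then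
      1 + delta
    else
      pvAltLoop base_target context rest delta

def apply_synergy_bonus_alt (base_target : Int) (synergies : List (List (String × String))) (context : String) : Int :=
  pvAltLoop base_target context synergies.reverse 0

-- ===== PRECONDITION & SPEC =====
-- Pre_ excludes exactly the inputs where some synergy dict lacks the 'effect'
-- key, on which the Python A raises KeyError.
def Pre_apply_synergy_bonus (base_target : Int) (synergies : List (List (String × String))) (context : String) : Prop :=
  ∀ syn ∈ synergies, (syn.map Prod.fst).contains "effect" = true
instance (base_target : Int) (synergies : List (List (String × String))) (context : String) : Decidable (Pre_apply_synergy_bonus base_target synergies context) := by unfold Pre_apply_synergy_bonus; infer_instance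

def pvWitness_apply_synergy_bonus : Int × (List (List (String × String))) × String :=
  (75, [[("effect", "all_bonus_20")], [("effect", "danger_auto_success")]], "danger_detection")

def Spec_apply_synergy_bonus (base_target : Int) (synergies : List (List (String × String))) (context : String) (out : Int) : Prop := out = apply_synergy_bonus_alt base_target synergies context
instance (base_target : Int) (synergies : List (List (String × String))) (context : String) (out : Int) : Decidable (Spec_apply_synergy_bonus base_target synergies context out) := by unfold Spec_apply_synergy_bonus; infer_instance

-- ===== CLAIM (what is proved, stated in full; the proofs are below) =====
def Claim_equal_apply_synergy_bonus : Prop := ∀ (base_target : Int) (synergies : List (List (String × String))) (context : String), Dom_apply_synergy_bonus base_target synergies context → Pre_apply_synergy_bonus base_target synergies context → Spec_apply_synergy_bonus base_target synergies context (apply_synergy_bonus base_target synergies context)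

-- ===== LEMMAS AND PROOFS =====

-- Key invariant: running B's reverse loop on l.reverse with accumulator delta
-- yields A's forward fold over l, plus delta.
theorem pvAltLoop_reverse (base_target : Int) (context : String) :
    ∀ (l : List (List (String × String))) (delta : Int),
      pvAltLoop base_target context l.reverse delta
        = apply_synergy_bonus base_target l context + delta := by
  intro l
  induction l using List.reverseRecOn with
  | nil => intro delta; simp [pvAltLoop, apply_synergy_bonus]
  | append_singleton l s ih =>
    intro delta
    simp only [List.reverse_append, List.reverse_cons, List.reverse_nil, List.nil_append,
      List.cons_append, pvAltLoop, apply_synergy_bonus, List.foldl_append, List.foldl_cons,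
      List.foldl_nil]
    by_cases h1 : pvEffect s == "all_bonus_20"
    · simp only [h1, ih]
      simp [apply_synergy_bonus]; omega
    · simp only [h1, Bool.false_eq_true, if_false]
      by_cases h2 : (pvEffect s == "danger_auto_success" && context == "danger_detection") = true
      · simp [h2]
      · simp only [h2, Bool.false_eq_true, if_false, ih]
        simp [apply_synergy_bonus]

-- ===== VERDICT (by name: the statement is the Claim_ definition above) =====
theorem apply_synergy_bonus_spec : Claim_equal_apply_synergy_bonus := by
  intro base_target synergies context _ _
  unfold Spec_apply_synergy_bonus apply_synergy_bonus_alt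
  rw [pvAltLoop_reverse]
  omega
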